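-- pv_equiv track=rewrite | github.com/maeeri/tira | Wk6/test.py | count_minimum_height_trees
-- ===== SOURCE A (Python) =====
-- def count_minimum_height_trees(n):
--     if n == 0 or n == 1:
--         return 1
--     if n == 2:
--         return 2
--     count = 0
--     for i in range(n//2):
--         count += count_minimum_height_trees(i) * count_minimum_height_trees(n-i-1)
--     if n % 2 == 0:
--         count += count_minimum_height_trees(n//2-1) * count_minimum_height_trees(n//2)
--     return count
-- ===== SOURCE B (Python) =====
-- def count_minimum_height_trees(n):
--     # Bottom-up DP: one table f[0..n], each entry from earlier entries. O(n^2).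
--     if n < 0:
--         return 0
--     f = []
--     for m in range(n + 1):
--         if m < 2:
--             f.append(1)
--         elif m == 2:
--             f.append(2)
--         else:
--             c = sum(f[i] * f[m - i - 1] for i in range(m // 2))
--             if m % 2 == 0:
--                 c += f[m // 2 - 1] * f[m // 2]
--             f.append(c)
--     return f[n]
-- ===== Notes on version B (the rewrite author's own statement) =====
-- stated objective: faster
-- what changed: Replaced the exponential naive recursion by a bottom-up dynamic-programming table f[0..n] built in one pass, each entry computed from earlier table entries; intended as faster (in a timing run A already timed out at n=16 where B returned instantly, so no ratio could be measured).
-- crash fix: On negative even n, A recurses forever (RecursionError); B returns zero there (no trees of negative size). — e.g. on count_minimum_height_trees(-2): A raises RecursionError, B returns 0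
import Mathlib
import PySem

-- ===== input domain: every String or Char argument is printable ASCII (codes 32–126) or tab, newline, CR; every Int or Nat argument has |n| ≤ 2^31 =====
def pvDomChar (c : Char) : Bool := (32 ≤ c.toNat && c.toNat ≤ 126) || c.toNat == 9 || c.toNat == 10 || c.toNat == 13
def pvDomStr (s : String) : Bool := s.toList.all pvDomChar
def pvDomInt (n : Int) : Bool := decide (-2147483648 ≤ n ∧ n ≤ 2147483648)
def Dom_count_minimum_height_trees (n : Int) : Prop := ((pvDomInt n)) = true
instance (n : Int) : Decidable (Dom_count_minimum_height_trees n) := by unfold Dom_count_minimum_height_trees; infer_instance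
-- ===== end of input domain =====

-- B replaces A's exponential naive recursion by a bottom-up DP table (intended as faster; a timing run saw A time out at n=16 where B returned, so no ratio was measured); equal wherever A returns.


-- ===== PORT A =====
-- Fuel makes A's recursion total in Lean; fuel n.toNat + 1 is enough on every input where the
-- Python terminates (each recursive call's argument is smaller and nonnegative), so the port is
-- exact there; on negative even n the Python recurses forever.
def countA_fuel : Nat → Int → Int
  | 0, _ => 0
  | fu+1, n =>
    if n = 0 ∨ n = 1 then 1
    else if n = 2 then 2
    else
      let count := (PySem.List.pyRange 0 (PySem.Int.floordiv n 2) 1).foldl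
        (fun acc i => acc + countA_fuel fu i * countA_fuel fu (n - i - 1)) 0
      if PySem.Int.mod n 2 = 0 then
        count + countA_fuel fu (PySem.Int.floordiv n 2 - 1) * countA_fuel fu (PySem.Int.floordiv n 2)
      else count

def count_minimum_height_trees (n : Int) : Int := countA_fuel (n.toNat + 1) n

-- ===== PORT B =====
-- Source B's loop body: the table entry for index m, computed from the table f of entries 0..m-1.
def altStep (f : List Int) (m : Nat) : Int :=
  if m < 2 then 1
  else if m = 2 then 2
  else
    let c := (List.range (m / 2)).foldl (fun acc i => acc + f.getD i 0 * f.getD (m - i - 1) 0) 0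
    if m % 2 = 0 then c + f.getD (m / 2 - 1) 0 * f.getD (m / 2) 0 else c

-- Source B's 'for m in range(n+1): f.append(...)' loop: altTable m = table after m appends.
def altTable : Nat → List Int
  | 0 => []
  | m+1 => altTable m ++ [altStep (altTable m) m]

def count_minimum_height_trees_alt (n : Int) : Int :=
  if n < 0 then 0 else (altTable (n.toNat + 1)).getD n.toNat 0

-- ===== PRECONDITION & SPEC =====
-- Pre_ excludes exactly the negative even inputs, on which Python A hits infinite recursion (RecursionError).
def Pre_count_minimum_height_trees (n : Int) : Prop := 0 ≤ n ∨ PySem.Int.mod n 2 = 1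
instance (n : Int) : Decidable (Pre_count_minimum_height_trees n) := by unfold Pre_count_minimum_height_trees; infer_instance
def pvWitness_count_minimum_height_trees : Int := 5

-- On negative even n, A recurses forever (RecursionError); B returns zero there (no trees of negative size).
def Raises_count_minimum_height_trees (n : Int) : Prop := n < 0 ∧ PySem.Int.mod n 2 = 0
instance (n : Int) : Decidable (Raises_count_minimum_height_trees n) := by unfold Raises_count_minimum_height_trees; infer_instance
def pvRaiseWitness_count_minimum_height_trees : Int := -2
def pvRaiseWitnessOut_count_minimum_height_trees : Int := 0

def Spec_count_minimum_height_trees (n : Int) (out : Int) : Prop := out = count_minimum_height_trees_alt n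
instance (n : Int) (out : Int) : Decidable (Spec_count_minimum_height_trees n out) := by unfold Spec_count_minimum_height_trees; infer_instance

-- ===== CLAIM (what is proved, stated in full; the proofs are below) =====
def Claim_equal_count_minimum_height_trees : Prop := ∀ (n : Int), Dom_count_minimum_height_trees n → Pre_count_minimum_height_trees n → Spec_count_minimum_height_trees n (count_minimum_height_trees n)

def Claim_raises_count_minimum_height_trees : Prop := (∀ (n : Int), Dom_count_minimum_height_trees n → Raises_count_minimum_height_trees n → ¬ Pre_count_minimum_height_trees n) ∧ (Dom_count_minimum_height_trees (pvRaiseWitness_count_minimum_height_trees) ∧ Raises_count_minimum_height_trees (pvRaiseWitness_count_minimum_height_trees) ∧ count_minimum_height_trees_alt (pvRaiseWitness_count_minimum_height_trees) = pvRaiseWitnessOut_count_minimum_height_trees)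

-- ===== LEMMAS AND PROOFS =====

-- With any sufficient fuel, A's value at a nonnegative argument k is the canonical one (fuel k+1).
theorem countA_fuel_mono : ∀ (k : Nat) (fu : Nat), k ≤ fu →
    countA_fuel (fu + 1) (k : Int) = countA_fuel (k + 1) (k : Int) := by
  intro k
  induction k using Nat.strong_induction_on with
  | _ k ih =>
    intro fu hfu
    by_cases h01 : (k : Int) = 0 ∨ (k : Int) = 1
    · simp only [countA_fuel, if_pos h01]
    by_cases h2 : (k : Int) = 2
    · simp only [countA_fuel, if_neg h01, if_pos h2]
    have hk3 : 3 ≤ k := by omega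
    have step : ∀ (f : Nat) (j : Nat), j < k → k ≤ f →
        countA_fuel f (j : Int) = countA_fuel (j + 1) (j : Int) := by
      intro f j hj hf
      rw [show f = (f - 1) + 1 by omega]
      exact ih j hj (f - 1) (by omega)
    have hflo : PySem.Int.floordiv (k : Int) 2 = ((k / 2 : Nat) : Int) := by
      exact_mod_cast PySem.Int.floordiv_natCast k 2
    simp only [countA_fuel, if_neg h01, if_neg h2, hflo]
    have hfold : ∀ (f : Nat), k ≤ f →
        (PySem.List.pyRange 0 ((k / 2 : Nat) : Int) 1).foldl
          (fun acc i => acc + countA_fuel f i * countA_fuel f ((k : Int) - i - 1)) 0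
        = (PySem.List.pyRange 0 ((k / 2 : Nat) : Int) 1).foldl
          (fun acc i => acc + countA_fuel (i.toNat + 1) i * countA_fuel ((k - i.toNat - 1 : Nat) + 1) ((k : Int) - i - 1)) 0 := by
      intro f hf
      apply PySem.List.foldl_congr_mem
      intro acc i hi
      rw [PySem.List.mem_pyRange_one] at hi
      obtain ⟨j, rfl⟩ : ∃ j : Nat, i = (j : Int) := ⟨i.toNat, (Int.toNat_of_nonneg hi.1).symm⟩
      have hjk : j < k := by omega
      have h2' : ((k : Int) - (j : Int) - 1) = ((k - j - 1 : Nat) : Int) := by omega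
      rw [h2', step f j hjk hf, step f (k - j - 1) (by omega) hf]
      simp
    rw [hfold fu (by omega), hfold k (by omega)]
    have e1 : ((k / 2 : Nat) : Int) - 1 = ((k / 2 - 1 : Nat) : Int) := by omega
    rw [e1, step fu (k / 2 - 1) (by omega) (by omega), step k (k / 2 - 1) (by omega) (by omega),
        step fu (k / 2) (by omega) (by omega), step k (k / 2) (by omega) (by omega)]

-- One DP step: if the table agrees with A's canonical values below m, the new entry is A's value at m.
theorem altStep_eq (m : Nat) (f : List Int)
    (hf : ∀ k, k < m → f.getD k 0 = countA_fuel (k + 1) (k : Int)) :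
    altStep f m = countA_fuel (m + 1) (m : Int) := by
  by_cases hm2 : m < 2
  · have h01 : (m : Int) = 0 ∨ (m : Int) = 1 := by omega
    simp only [altStep, if_pos hm2, countA_fuel, if_pos h01]
  by_cases hm2' : m = 2
  · subst hm2'
    simp [altStep, countA_fuel]
  have hm3 : 3 ≤ m := by omega
  have h01 : ¬((m : Int) = 0 ∨ (m : Int) = 1) := by omega
  have h2 : ¬((m : Int) = 2) := by omega
  have stepm : ∀ j, j < m → countA_fuel m (j : Int) = countA_fuel (j + 1) (j : Int) := by
    intro j hj
    rw [show m = (m - 1) + 1 by omega]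
    exact countA_fuel_mono j (m - 1) (by omega)
  have hflo : PySem.Int.floordiv (m : Int) 2 = ((m / 2 : Nat) : Int) := by
    exact_mod_cast PySem.Int.floordiv_natCast m 2
  have hmod : PySem.Int.mod (m : Int) 2 = ((m % 2 : Nat) : Int) := by
    exact_mod_cast PySem.Int.mod_natCast m 2
  simp only [countA_fuel, if_neg h01, if_neg h2, hflo, hmod]
  rw [PySem.List.pyRange_one, show (((m / 2 : Nat) : Int) - 0).toNat = m / 2 by omega, List.foldl_map]
  have hfold : (List.range (m / 2)).foldl
        (fun acc (j : Nat) => acc + countA_fuel m (0 + (j : Int)) * countA_fuel m ((m : Int) - (0 + (j : Int)) - 1)) 0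
      = (List.range (m / 2)).foldl
        (fun acc (j : Nat) => acc + f.getD j 0 * f.getD (m - j - 1) 0) 0 := by
    apply PySem.List.foldl_congr_mem
    intro acc j hj
    rw [List.mem_range] at hj
    have hjm : j < m := by omega
    have hz : (0 : Int) + (j : Int) = (j : Int) := by omega
    have hc : (m : Int) - (j : Int) - 1 = ((m - j - 1 : Nat) : Int) := by omega
    rw [hz, hc, stepm j hjm, stepm (m - j - 1) (by omega), hf j hjm, hf (m - j - 1) (by omega)]
  have e1 : ((m / 2 : Nat) : Int) - 1 = ((m / 2 - 1 : Nat) : Int) := by omega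
  simp only [altStep, if_neg (by omega : ¬ m < 2), if_neg hm2']
  by_cases he : m % 2 = 0
  · rw [if_pos (by exact_mod_cast congrArg (Nat.cast : Nat → Int) he : ((m % 2 : Nat) : Int) = 0),
        if_pos he, hfold, e1,
        stepm (m / 2 - 1) (by omega), stepm (m / 2) (by omega),
        hf (m / 2 - 1) (by omega), hf (m / 2) (by omega)]
  · rw [if_neg (by omega : ¬ ((m % 2 : Nat) : Int) = 0), if_neg he, hfold]

-- The DP table has length m and agrees with A's canonical values on indices < m.
theorem altTable_spec : ∀ (m : Nat),
    (altTable m).length = m ∧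
      ∀ k, k < m → (altTable m).getD k 0 = countA_fuel (k + 1) (k : Int) := by
  intro m
  induction m with
  | zero => exact ⟨rfl, by intro k hk; omega⟩
  | succ m ih =>
    obtain ⟨hlen, hval⟩ := ih
    refine ⟨by simp [altTable, hlen], ?_⟩
    intro k hk
    by_cases hkm : k < m
    · rw [altTable, List.getD_append _ _ _ _ (by omega)]
      exact hval k hkm
    · have hkm' : k = m := by omega
      subst hkm'
      rw [altTable, List.getD_append_right _ _ _ _ (by omega), hlen]
      simp only [Nat.sub_self, List.getD]
      simpa using altStep_eq k (altTable k) hval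


-- ===== VERDICT (by name: the statement is the Claim_ definition above) =====
theorem count_minimum_height_trees_spec : Claim_equal_count_minimum_height_trees := by
  intro n _ hpre
  unfold Spec_count_minimum_height_trees
  by_cases hn : 0 ≤ n
  · obtain ⟨k, rfl⟩ : ∃ k : Nat, n = (k : Int) := ⟨n.toNat, (Int.toNat_of_nonneg hn).symm⟩
    unfold count_minimum_height_trees count_minimum_height_trees_alt
    rw [if_neg (by omega : ¬ (k : Int) < 0), Int.toNat_natCast]
    exact (((altTable_spec (k + 1)).2 k (by omega))).symm
  · have hmod : PySem.Int.mod n 2 = 1 := by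
      rcases hpre with h | h
      · exact absurd h hn
      · exact h
    unfold count_minimum_height_trees count_minimum_height_trees_alt
    rw [if_pos (by omega : n < 0)]
    have hdiv : PySem.Int.floordiv n 2 ≤ 0 := by
      rw [PySem.Int.floordiv_eq_ediv_of_pos (by norm_num)]
      omega
    simp only [countA_fuel, if_neg (by omega : ¬(n = 0 ∨ n = 1)), if_neg (by omega : ¬ n = 2),
      PySem.List.pyRange_one_eq_nil hdiv, List.foldl_nil]
    rw [if_neg (by rw [hmod]; norm_num)]

@[simp] theorem count_minimum_height_trees_raises : Claim_raises_count_minimum_height_trees := by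
  unfold Claim_raises_count_minimum_height_trees
  constructor
  · intro n _ hr hp
    obtain ⟨h1, h2⟩ := hr
    rcases hp with h | h
    · omega
    · rw [h2] at h; exact absurd h (by norm_num)
  · refine ⟨by decide, by decide, by decide⟩
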